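-- pv_equiv track=rewrite | github.com/TUM-CBR/pymol-plugins | cbr/schema/visual/SequencesPositionEditor.py | get_lengths
-- ===== SOURCE A (Python) =====
-- from typing import Any, Dict, Iterable, List, Optional
--
-- def get_lengths(seq_segments: Dict[str, List[str]]) -> List[int]:
--
--     sizes = [
--         [len(seg) for seg in segments]
--         for segments in seq_segments.values()
--     ]
--     count = len(sizes[0])
--     assert all(len(size) == count for size in sizes), "All sequences must have the same number of shuffling points"
--
--     return [
--         max(size[i] for size in sizes)
--         for i in range(0, count)
--     ]
-- ===== SOURCE B (Python) =====
-- def get_lengths(seq_segments):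
--     # Single row-major accumulating pass: running elementwise max, no size matrix.
--     vals = list(seq_segments.values())
--     result = [len(seg) for seg in vals[0]]
--     for segments in vals[1:]:
--         lens = [len(seg) for seg in segments]
--         assert len(lens) == len(result), "All sequences must have the same number of shuffling points"
--         result = [max(a, b) for a, b in zip(result, lens)]
--     return result
-- ===== Notes on version B (the rewrite author's own statement) =====
-- stated objective: alternative
-- what changed: Replaces A's build-the-whole-size-matrix-then-scan-each-column-by-index approach with a single row-major pass keeping a running elementwise-max list updated per sequence.
import Mathlib
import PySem

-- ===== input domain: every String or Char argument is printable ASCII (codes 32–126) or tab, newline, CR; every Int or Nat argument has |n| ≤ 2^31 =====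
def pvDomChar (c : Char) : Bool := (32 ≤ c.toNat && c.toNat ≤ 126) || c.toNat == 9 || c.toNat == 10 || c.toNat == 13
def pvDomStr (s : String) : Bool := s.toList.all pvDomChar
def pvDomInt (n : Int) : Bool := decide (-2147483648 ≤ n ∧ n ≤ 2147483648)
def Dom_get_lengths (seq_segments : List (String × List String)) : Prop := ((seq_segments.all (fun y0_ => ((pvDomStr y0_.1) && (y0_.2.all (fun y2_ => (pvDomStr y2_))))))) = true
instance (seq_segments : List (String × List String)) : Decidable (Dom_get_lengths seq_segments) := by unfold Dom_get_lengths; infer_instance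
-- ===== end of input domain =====

-- B replaces A's size-matrix + per-column index scan with one row-major running-max pass (objective: alternative decomposition).

-- shared input normalisation: the dict's value lists in insertion order (Python dict semantics)
def pvVals (seq_segments : List (String × List String)) : List (List String) :=
  (PySem.Dict.ofList seq_segments).values

-- ===== PORT A =====
def get_lengths (seq_segments : List (String × List String)) : List Int :=
  let sizes := (pvVals seq_segments).map (fun segments => segments.map PySem.Str.len)
  let count := PySem.List.len (sizes.headD [])  -- sizes[0]: IndexError on an empty dict, excluded by Pre_
  (PySem.List.pyRange 0 count).map (fun i =>
    (PySem.List.max? (sizes.map (fun size => PySem.List.pyGetD size i 0)) (fun y => y)).getD 0)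

-- ===== PORT B =====
def get_lengths_alt (seq_segments : List (String × List String)) : List Int :=
  let vals := pvVals seq_segments
  let result := (vals.headD []).map PySem.Str.len  -- vals[0]: IndexError on an empty dict, excluded by Pre_
  (vals.drop 1).foldl (fun res segments =>
    List.zipWith max res (segments.map PySem.Str.len)) result

-- ===== PRECONDITION & SPEC =====
-- Pre_ excludes exactly the inputs where A raises: the empty dict (IndexError on sizes[0]) and
-- mismatched per-sequence segment counts (AssertionError).
def Pre_get_lengths (seq_segments : List (String × List String)) : Prop :=
  pvVals seq_segments ≠ [] ∧
  ∀ v ∈ pvVals seq_segments, v.length = ((pvVals seq_segments).headD []).length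
instance (seq_segments : List (String × List String)) : Decidable (Pre_get_lengths seq_segments) := by unfold Pre_get_lengths; infer_instance

def pvWitness_get_lengths : (List (String × List String)) :=
  [("a", ["x", "yy"]), ("b", ["zzz", ""])]

def Spec_get_lengths (seq_segments : List (String × List String)) (out : List Int) : Prop := out = get_lengths_alt seq_segments
instance (seq_segments : List (String × List String)) (out : List Int) : Decidable (Spec_get_lengths seq_segments out) := by unfold Spec_get_lengths; infer_instance

-- ===== CLAIM (what is proved, stated in full; the proofs are below) =====
def Claim_equal_get_lengths : Prop := ∀ (seq_segments : List (String × List String)), Dom_get_lengths seq_segments → Pre_get_lengths seq_segments → Spec_get_lengths seq_segments (get_lengths seq_segments)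

-- ===== LEMMAS AND PROOFS =====

-- core: the per-column max over a list of equal-length rows is the row-wise running elementwise max
lemma colmax_eq_fold (rs : List (List Int)) (r : List Int)
    (h : ∀ s ∈ rs, s.length = r.length) :
    (PySem.List.pyRange 0 (PySem.List.len r)).map
      (fun i => (PySem.List.max? (PySem.List.pyGetD r i 0 :: rs.map (fun size => PySem.List.pyGetD size i 0)) (fun y => y)).getD 0)
    = rs.foldl (fun acc s => List.zipWith max acc s) r := by
  induction rs generalizing r with
  | nil =>
      simp only [List.map_nil, PySem.List.max?_id_cons, List.foldl_nil, Option.getD_some]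
      exact PySem.List.map_pyGetD_pyRange_zero r 0
  | cons s rs ih =>
      have hs : s.length = r.length := h s (by simp)
      have hlen : (List.zipWith max r s).length = r.length := by
        simp [List.length_zipWith, hs]
      have hrec := ih (List.zipWith max r s) (fun t ht => by
        rw [hlen]; exact h t (by simp [ht]))
      rw [List.foldl_cons, ← hrec]
      have hlenI : PySem.List.len (List.zipWith max r s) = PySem.List.len r := by
        simp [PySem.List.len, hlen]
      rw [hlenI]
      apply List.map_congr_left
      intro i hi
      have hmem := (PySem.List.mem_pyRange_one).mp hi
      have h0 : 0 ≤ i := hmem.1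
      have h1 : i.toNat < r.length := by
        have := hmem.2
        simp only [PySem.List.len] at this
        omega
      simp only [List.map_cons, PySem.List.max?_id_cons, Option.getD_some, List.foldl_cons]
      congr 1
      rw [PySem.List.pyGetD_of_nonneg _ _ h0, PySem.List.pyGetD_of_nonneg _ _ h0,
        PySem.List.pyGetD_of_nonneg _ _ h0]
      have h2 : i.toNat < s.length := by omega
      have h3 : i.toNat < (List.zipWith max r s).length := by omega
      rw [List.getD_eq_getElem _ _ h3, List.getD_eq_getElem _ _ h1, List.getD_eq_getElem _ _ h2,
        List.getElem_zipWith]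

theorem get_lengths_spec : Claim_equal_get_lengths := by
  intro l _ hpre
  unfold Spec_get_lengths get_lengths get_lengths_alt
  obtain ⟨hne, hlens⟩ := hpre
  obtain ⟨v, vs, hv⟩ := List.exists_cons_of_ne_nil hne
  rw [hv]
  simp only [List.headD_cons, List.drop_one, List.tail_cons, List.map_cons]
  rw [← List.foldl_map]
  exact colmax_eq_fold (vs.map (fun segments => segments.map PySem.Str.len)) (v.map PySem.Str.len)
    (fun t ht => by
      obtain ⟨w, hw, rfl⟩ := List.mem_map.mp ht
      have := hlens w (by rw [hv]; exact List.mem_cons_of_mem _ hw)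
      simp [hv] at this ⊢
      exact this)
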